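-- pv_equiv track=rewrite | github.com/kbvanzomeren/AoC | 2023/day_01.py | transform_data
-- ===== SOURCE A (Python) =====
-- rep_num = {"one": 1, "two": 2, "three": 3, "four": 4, "five": 5, "six": 6, "seven": 7, "eight": 8, "nine": 9}
--
-- def transform_data(data):
--     results = []
--     for line in data:
--         pos = {}
--         for number, value in rep_num.items():
--             if number in line:
--                 pos[line.find(number)] = value
--                 pos[line.rfind(number)] = value
--         if pos:
--             _min, _max = min(pos), max(pos)
--             line = line[:_min] + str(pos[_min]) + line[_min + 1:]
--             line = line[:_max] + str(pos[_max]) + line[_max + 1:]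
--         results.append(line)
--     return results
-- ===== SOURCE B (Python) =====
-- rep_num = {"one": 1, "two": 2, "three": 3, "four": 4, "five": 5, "six": 6, "seven": 7, "eight": 8, "nine": 9}
--
-- def _fix_line(line):
--     # one positional scan: every (start index, value) of a number word, in index order
--     hits = [(i, v) for i in range(len(line)) for w, v in rep_num.items() if line.startswith(w, i)]
--     if not hits:
--         return line
--     i, vi = hits[0]
--     j, vj = hits[-1]
--     line = line[:i] + str(vi) + line[i + 1:]
--     return line[:j] + str(vj) + line[j + 1:]
--
-- def transform_data(data):
--     return [_fix_line(line) for line in data]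
-- ===== Notes on version B (the rewrite author's own statement) =====
-- stated objective: alternative
-- what changed: B replaces A's per-word find/rfind passes plus a position dict with a single positional scan that lists all (index, value) word matches in order and splices at the first and last hit.
import Mathlib
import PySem

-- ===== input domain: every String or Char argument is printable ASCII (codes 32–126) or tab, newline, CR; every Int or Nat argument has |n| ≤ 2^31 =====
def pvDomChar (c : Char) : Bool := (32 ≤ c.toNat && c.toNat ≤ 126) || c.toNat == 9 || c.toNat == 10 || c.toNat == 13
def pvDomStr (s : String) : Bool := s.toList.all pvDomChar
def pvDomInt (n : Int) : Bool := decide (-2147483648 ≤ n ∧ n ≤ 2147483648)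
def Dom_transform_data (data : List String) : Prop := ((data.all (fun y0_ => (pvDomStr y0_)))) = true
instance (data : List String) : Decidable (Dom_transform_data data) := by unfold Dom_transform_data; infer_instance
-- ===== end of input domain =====

-- B replaces A's per-word find/rfind passes plus a position dict by one positional scan listing
-- every (index, value) word match in index order and splicing at the first and last hit
-- (objective: alternative decomposition, same asymptotic cost).

-- ===== PORT A =====
-- the module constant rep_num, as an insertion-ordered items list
def pvWords : List (List Char × Int) :=
  [(['o','n','e'], 1), (['t','w','o'], 2), (['t','h','r','e','e'], 3), (['f','o','u','r'], 4),
   (['f','i','v','e'], 5), (['s','i','x'], 6), (['s','e','v','e','n'], 7), (['e','i','g','h','t'], 8),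
   (['n','i','n','e'], 9)]

-- line[:p] + str(v) + line[p+1:]  (identical source line in A and in B; shared helper)
def pvSplice (s : List Char) (p : Int) (v : Int) : List Char :=
  PySem.List.slice s none (some p) ++ PySem.Int.toChars v ++ PySem.List.slice s (some (p + 1)) none

-- pos = {}; for number, value in rep_num.items(): ...
def pvPos (s : List Char) : PySem.Dict Int Int :=
  pvWords.foldl (fun d wv =>
    if PySem.Chars.isIn wv.1 s then
      (d.insert (PySem.Chars.find s wv.1) wv.2).insert (PySem.Chars.rfind s wv.1) wv.2
    else d) PySem.Dict.empty

-- the per-line body of A's loop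
def pvLineA (s : List Char) : List Char :=
  let pos := pvPos s
  if pos.size ≠ 0 then
    match PySem.List.min? pos.keys (fun k => k), PySem.List.max? pos.keys (fun k => k) with
    | some mn, some mx =>
        -- pos[_min] / pos[_max]: both keys are present here, so Python's lookup never raises;
        -- getD is exact on present keys
        pvSplice (pvSplice s mn (pos.getD mn 0)) mx (pos.getD mx 0)
    | _, _ => s
  else s

def transform_data (data : List String) : List String :=
  data.foldl (fun results line => results ++ [String.ofList (pvLineA line.toList)]) []

-- ===== PORT B =====
-- line.startswith(w, i) with 0 ≤ i is exactly: w is a prefix of line[i:]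
def pvHits (s : List Char) : List (Int × Int) :=
  (List.range s.length).flatMap (fun i =>
    pvWords.filterMap (fun wv =>
      if PySem.Chars.startswith (s.drop i) wv.1 then some ((i : Int), wv.2) else none))

def pvFixLine (s : List Char) : List Char :=
  match (pvHits s).head?, (pvHits s).getLast? with
  | some (i, vi), some (j, vj) => pvSplice (pvSplice s i vi) j vj
  | _, _ => s

def transform_data_alt (data : List String) : List String :=
  data.map (fun line => String.ofList (pvFixLine line.toList))

-- ===== PRECONDITION & SPEC =====
def Spec_transform_data (data : List String) (out : List String) : Prop := out = transform_data_alt data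
instance (data : List String) (out : List String) : Decidable (Spec_transform_data data out) := by unfold Spec_transform_data; infer_instance

-- ===== CLAIM (what is proved, stated in full; the proofs are below) =====
def Claim_equal_transform_data : Prop := ∀ (data : List String), Dom_transform_data data → Spec_transform_data data (transform_data data)

-- ===== LEMMAS AND PROOFS =====

-- rfind.go unfolding equations
theorem pvRgoZero (s sub : List Char) :
    PySem.Chars.rfind.go s sub 0 = if sub.isPrefixOf s then 0 else -1 := rfl

theorem pvRgoSucc (s sub : List Char) (j : Nat) :
    PySem.Chars.rfind.go s sub (j + 1) =
      if sub.isPrefixOf (s.drop (j + 1)) then ((j : Int) + 1) else PySem.Chars.rfind.go s sub j := by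
  simp only [PySem.Chars.rfind.go]; push_cast; ring_nf

-- every occurrence at i ≤ j is a lower bound for rfind.go
theorem pvRgoUb (s sub : List Char) (j i : Nat) (hij : i ≤ j) (hp : sub <+: s.drop i) :
    (i : Int) ≤ PySem.Chars.rfind.go s sub j := by
  induction j with
  | zero =>
    have hi0 : i = 0 := Nat.le_zero.mp hij
    subst hi0
    rw [pvRgoZero]
    have : sub.isPrefixOf s = true := List.isPrefixOf_iff_prefix.mpr (by simpa using hp)
    simp [this]
  | succ j ih =>
    rw [pvRgoSucc]
    by_cases hp1 : sub.isPrefixOf (s.drop (j + 1)) = true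
    · simp only [hp1, if_true]
      exact_mod_cast Int.ofNat_le.mpr hij
    · simp only [hp1, Bool.false_eq_true, if_false]
      rcases Nat.lt_or_ge i (j + 1) with hlt | hge
      · exact ih (Nat.lt_succ_iff.mp hlt)
      · exfalso
        have : i = j + 1 := Nat.le_antisymm hij hge
        subst this
        exact hp1 (List.isPrefixOf_iff_prefix.mpr hp)

-- a nonnegative rfind.go points at an occurrence
theorem pvRgoOcc (s sub : List Char) (j : Nat) (h : 0 ≤ PySem.Chars.rfind.go s sub j) :
    sub <+: s.drop (PySem.Chars.rfind.go s sub j).toNat := by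
  induction j with
  | zero =>
    rw [pvRgoZero] at h ⊢
    by_cases hp0 : sub.isPrefixOf s = true
    · simpa [hp0] using List.isPrefixOf_iff_prefix.mp hp0
    · simp [hp0] at h
  | succ j ih =>
    rw [pvRgoSucc] at h ⊢
    by_cases hp1 : sub.isPrefixOf (s.drop (j + 1)) = true
    · have := List.isPrefixOf_iff_prefix.mp hp1
      simp only [hp1, if_true]
      have hto : ((j : Int) + 1).toNat = j + 1 := by omega
      rw [hto]; exact this
    · simp only [hp1, Bool.false_eq_true, if_false] at h ⊢
      exact ih h

-- a nonempty prefix of s.drop i forces i < s.length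
theorem pvOccLt (s sub : List Char) (i : Nat) (hne : sub ≠ []) (hp : sub <+: s.drop i) :
    i < s.length := by
  by_contra hge
  push Not at hge
  rw [List.drop_eq_nil_of_le hge] at hp
  exact hne (List.prefix_nil.mp hp)

-- find is minimal among occurrences
theorem pvFindLe (s sub : List Char) (i : Nat) (hp : sub <+: s.drop i) :
  0 ≤ PySem.Chars.find s sub ∧ PySem.Chars.find s sub ≤ (i : Int) := by
  have hin : PySem.Chars.isIn sub s = true :=
    (PySem.Chars.exists_prefix_drop_iff_isIn sub s).mp ⟨i, hp⟩
  have h0 : 0 ≤ PySem.Chars.find s sub :=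
    (PySem.Chars.find_nonneg_iff s sub).mpr ((PySem.Chars.isIn_iff_infix sub s).mp hin)
  refine ⟨h0, ?_⟩
  have hspec := PySem.Chars.find_spec h0
  by_contra hgt
  push Not at hgt
  have hlt : i < (PySem.Chars.find s sub).toNat := by omega
  exact hspec.2 i hlt hp

-- keys of A's dict fold
theorem pvKeysFold (s : List Char) (ws : List (List Char × Int)) (d : PySem.Dict Int Int) (k : Int) :
    k ∈ (ws.foldl (fun d wv =>
      if PySem.Chars.isIn wv.1 s then
        (d.insert (PySem.Chars.find s wv.1) wv.2).insert (PySem.Chars.rfind s wv.1) wv.2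
      else d) d).keys ↔
    k ∈ d.keys ∨ ∃ wv ∈ ws, PySem.Chars.isIn wv.1 s = true ∧
      (k = PySem.Chars.find s wv.1 ∨ k = PySem.Chars.rfind s wv.1) := by
  induction ws generalizing d with
  | nil => simp
  | cons wv ws ih =>
    simp only [List.foldl_cons, List.mem_cons]
    by_cases hin : PySem.Chars.isIn wv.1 s = true
    · rw [if_pos hin, ih]
      simp only [PySem.Dict.mem_keys_insert]
      constructor
      · rintro ((h | h | h) | ⟨wu, hmem, hu1, hu2⟩)
        · exact Or.inr ⟨wv, Or.inl rfl, hin, Or.inr h⟩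
        · exact Or.inr ⟨wv, Or.inl rfl, hin, Or.inl h⟩
        · exact Or.inl h
        · exact Or.inr ⟨wu, Or.inr hmem, hu1, hu2⟩
      · rintro (h | ⟨wu, hmem | hmem, hu1, hu2⟩)
        · exact Or.inl (Or.inr (Or.inr h))
        · subst hmem
          rcases hu2 with h | h
          · exact Or.inl (Or.inr (Or.inl h))
          · exact Or.inl (Or.inl h)
        · exact Or.inr ⟨wu, hmem, hu1, hu2⟩
    · rw [if_neg hin, ih]
      constructor
      · rintro (h | ⟨wu, hmem, hu1, hu2⟩)
        · exact Or.inl h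
        · exact Or.inr ⟨wu, Or.inr hmem, hu1, hu2⟩
      · rintro (h | ⟨wu, hmem | hmem, hu1, hu2⟩)
        · exact Or.inl h
        · exact absurd hu1 (by subst hmem; exact fun hh => hin hh)
        · exact Or.inr ⟨wu, hmem, hu1, hu2⟩

-- values of A's dict fold when all inserts at key k agree
theorem pvGetFold (s : List Char) (ws : List (List Char × Int)) (d : PySem.Dict Int Int)
    (k : Int) (v0 : Int)
    (h : ∀ wv ∈ ws, PySem.Chars.isIn wv.1 s = true →
       (k = PySem.Chars.find s wv.1 ∨ k = PySem.Chars.rfind s wv.1) → wv.2 = v0) :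
    (ws.foldl (fun d wv =>
      if PySem.Chars.isIn wv.1 s then
        (d.insert (PySem.Chars.find s wv.1) wv.2).insert (PySem.Chars.rfind s wv.1) wv.2
      else d) d).get? k = d.get? k ∨
    (ws.foldl (fun d wv =>
      if PySem.Chars.isIn wv.1 s then
        (d.insert (PySem.Chars.find s wv.1) wv.2).insert (PySem.Chars.rfind s wv.1) wv.2
      else d) d).get? k = some v0 := by
  induction ws generalizing d with
  | nil => simp
  | cons wv ws ih =>
    simp only [List.foldl_cons]
    have htail : ∀ wu ∈ ws, PySem.Chars.isIn wu.1 s = true →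
        (k = PySem.Chars.find s wu.1 ∨ k = PySem.Chars.rfind s wu.1) → wu.2 = v0 :=
      fun wu hm => h wu (List.mem_cons_of_mem _ hm)
    by_cases hin : PySem.Chars.isIn wv.1 s = true
    · rw [if_pos hin]
      rcases ih ((d.insert (PySem.Chars.find s wv.1) wv.2).insert (PySem.Chars.rfind s wv.1) wv.2) htail with h1 | h1
      · rw [h1, PySem.Dict.get?_insert, PySem.Dict.get?_insert]
        split_ifs with e1 e2
        · exact Or.inr (by rw [h wv (List.mem_cons_self) hin (Or.inr e1)])
        · exact Or.inr (by rw [h wv (List.mem_cons_self) hin (Or.inl e2)])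
        · exact Or.inl rfl
      · exact Or.inr h1
    · rw [if_neg hin]
      exact ih d htail

-- head of a flatMap comes from the first nonempty block
theorem pvHeadFlatMap {α β : Type} (l : List α) (g : α → List β) (x : β)
    (h : (l.flatMap g).head? = some x) :
    ∃ (k : Nat) (hk : k < l.length), (g l[k]).head? = some x ∧ ∀ m, m < k → ∀ (hm : m < l.length), g l[m] = [] := by
  induction l with
  | nil => simp at h
  | cons a l ih =>
    rw [List.flatMap_cons] at h
    cases hga : g a with
    | nil =>
      rw [hga, List.nil_append] at h
      obtain ⟨k, hk, h1, h2⟩ := ih h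
      refine ⟨k + 1, by simpa using Nat.succ_lt_succ hk, by simpa using h1, ?_⟩
      intro m hm hmlt
      cases m with
      | zero => simpa using hga
      | succ m' =>
        have : m' < l.length := by simpa using Nat.lt_of_succ_lt_succ hmlt
        simpa using h2 m' (Nat.lt_of_succ_lt_succ hm) this
    | cons y ys =>
      rw [hga] at h
      simp only [List.cons_append, List.head?_cons, Option.some.injEq] at h
      refine ⟨0, by simp, by simp [hga, h], ?_⟩
      intro m hm
      omega

-- last of a flatMap comes from the last nonempty block
theorem pvLastFlatMap {α β : Type} (l : List α) (g : α → List β) (x : β)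
    (h : (l.flatMap g).getLast? = some x) :
    ∃ (k : Nat) (hk : k < l.length), (g l[k]).getLast? = some x ∧ ∀ m, k < m → ∀ (hm : m < l.length), g l[m] = [] := by
  induction l with
  | nil => simp at h
  | cons a l ih =>
    rw [List.flatMap_cons] at h
    by_cases hnil : l.flatMap g = []
    · rw [hnil, List.append_nil] at h
      refine ⟨0, by simp, by simpa using h, ?_⟩
      intro m hm hmlt
      have hmem : (a :: l)[m] ∈ l := by
        cases m with
        | zero => omega
        | succ m' => simpa using List.getElem_mem (Nat.lt_of_succ_lt_succ hmlt)
      exact (List.flatMap_eq_nil_iff.mp hnil) _ hmem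
    · rw [List.getLast?_append_of_ne_nil _ hnil] at h
      obtain ⟨k, hk, h1, h2⟩ := ih h
      refine ⟨k + 1, by simpa using Nat.succ_lt_succ hk, by simpa using h1, ?_⟩
      intro m hm hmlt
      cases m with
      | zero => omega
      | succ m' =>
        have : m' < l.length := by simpa using Nat.lt_of_succ_lt_succ hmlt
        simpa using h2 m' (Nat.lt_of_succ_lt_succ hm) this

-- no two of the nine number words are comparable by prefix unless equal (with their values)
theorem pvWordsPrefixFree : ∀ wv ∈ pvWords, ∀ wu ∈ pvWords, wv.1 <+: wu.1 → wv = wu := by decide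

theorem pvWordsNe : ∀ wv ∈ pvWords, wv.1 ≠ [] := by decide

-- specialization: keys of pos
theorem pvKeys (s : List Char) (k : Int) :
    k ∈ (pvPos s).keys ↔ ∃ wv ∈ pvWords, PySem.Chars.isIn wv.1 s = true ∧
      (k = PySem.Chars.find s wv.1 ∨ k = PySem.Chars.rfind s wv.1) := by
  have := pvKeysFold s pvWords PySem.Dict.empty k
  simpa [pvPos, PySem.Dict.keys_empty] using this

-- every key of pos is a (Nat) occurrence position of some word
theorem pvKeyOcc (s : List Char) (k : Int) (hk : k ∈ (pvPos s).keys) :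
    ∃ n : Nat, k = (n : Int) ∧ n < s.length ∧ ∃ wv ∈ pvWords, wv.1 <+: s.drop n := by
  rcases (pvKeys s k).mp hk with ⟨wv, hmem, hin, hk2⟩
  have hne := pvWordsNe wv hmem
  rcases hk2 with hk2 | hk2
  · have h0 : 0 ≤ PySem.Chars.find s wv.1 :=
      (PySem.Chars.find_nonneg_iff s wv.1).mpr ((PySem.Chars.isIn_iff_infix wv.1 s).mp hin)
    have hocc := (PySem.Chars.find_spec h0).1
    refine ⟨(PySem.Chars.find s wv.1).toNat, by omega, pvOccLt s wv.1 _ hne hocc, wv, hmem, hocc⟩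
  · rcases (PySem.Chars.exists_prefix_drop_iff_isIn wv.1 s).mpr hin with ⟨j, hj⟩
    have hjlt : j < s.length := pvOccLt s wv.1 j hne hj
    have h0 : (j : Int) ≤ PySem.Chars.rfind s wv.1 :=
      pvRgoUb s wv.1 s.length j (Nat.le_of_lt hjlt) hj
    have h0' : 0 ≤ PySem.Chars.rfind s wv.1 := le_trans (by omega) h0
    have hocc := pvRgoOcc s wv.1 s.length h0'
    refine ⟨(PySem.Chars.rfind s wv.1).toNat, by omega, pvOccLt s wv.1 _ hne hocc, wv, hmem, hocc⟩

-- every occurrence puts its word's find and rfind into the keys, bracketing the position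
theorem pvOccKeys (s : List Char) (n : Nat) (wv : List Char × Int)
    (hmem : wv ∈ pvWords) (hp : wv.1 <+: s.drop n) :
    PySem.Chars.find s wv.1 ∈ (pvPos s).keys ∧ PySem.Chars.find s wv.1 ≤ (n : Int) ∧
    PySem.Chars.rfind s wv.1 ∈ (pvPos s).keys ∧ (n : Int) ≤ PySem.Chars.rfind s wv.1 := by
  have hin : PySem.Chars.isIn wv.1 s = true :=
    (PySem.Chars.exists_prefix_drop_iff_isIn wv.1 s).mp ⟨n, hp⟩
  have hne := pvWordsNe wv hmem
  have hnlt : n < s.length := pvOccLt s wv.1 n hne hp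
  refine ⟨(pvKeys s _).mpr ⟨wv, hmem, hin, Or.inl rfl⟩, (pvFindLe s wv.1 n hp).2,
    (pvKeys s _).mpr ⟨wv, hmem, hin, Or.inr rfl⟩,
    pvRgoUb s wv.1 s.length n (Nat.le_of_lt hnlt) hp⟩

-- the value stored at an occupied occurrence position is the value of the word occurring there
theorem pvValue (s : List Char) (n : Nat) (wv0 : List Char × Int)
    (hmem : wv0 ∈ pvWords) (hp : wv0.1 <+: s.drop n) (hk : ((n : Int)) ∈ (pvPos s).keys) :
    (pvPos s).getD (n : Int) 0 = wv0.2 := by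
  have hall : ∀ wv ∈ pvWords, PySem.Chars.isIn wv.1 s = true →
      ((n : Int) = PySem.Chars.find s wv.1 ∨ (n : Int) = PySem.Chars.rfind s wv.1) → wv.2 = wv0.2 := by
    intro wv hm hin hor
    have hocc : wv.1 <+: s.drop n := by
      rcases hor with he | he
      · have h0 : 0 ≤ PySem.Chars.find s wv.1 := by omega
        have := (PySem.Chars.find_spec h0).1
        rwa [show (PySem.Chars.find s wv.1).toNat = n by omega] at this
      · have h0 : 0 ≤ PySem.Chars.rfind s wv.1 := by omega
        have hro : wv.1 <+: s.drop (PySem.Chars.rfind s wv.1).toNat :=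
          pvRgoOcc s wv.1 s.length h0
        rwa [show (PySem.Chars.rfind s wv.1).toNat = n by omega] at hro
    have : wv = wv0 := by
      rcases List.prefix_or_prefix_of_prefix hocc hp with hpre | hpre
      · exact pvWordsPrefixFree wv hm wv0 hmem hpre
      · exact (pvWordsPrefixFree wv0 hmem wv hm hpre).symm
    rw [this]
  rcases pvGetFold s pvWords PySem.Dict.empty (n : Int) wv0.2 hall with hg | hg
  · exfalso
    rw [PySem.Dict.get?_empty] at hg
    have hg' : (pvPos s).get? (n : Int) = none := hg
    exact (PySem.Dict.get?_eq_none_iff_not_mem_keys (pvPos s) _).mp hg' hk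
  · have hg' : (pvPos s).get? (n : Int) = some wv0.2 := hg
    exact PySem.Dict.getD_of_get?_eq_some (pvPos s) 0 hg'

-- membership in B's hits list
theorem pvHitsMem (s : List Char) (p : Int × Int) :
    p ∈ pvHits s ↔ ∃ n : Nat, n < s.length ∧ ∃ wv ∈ pvWords, wv.1 <+: s.drop n ∧ p = ((n : Int), wv.2) := by
  simp only [pvHits, List.mem_flatMap, List.mem_range, List.mem_filterMap]
  constructor
  · rintro ⟨n, hn, wv, hm, hif⟩
    by_cases hs : PySem.Chars.startswith (s.drop n) wv.1 = true
    · rw [if_pos hs] at hif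
      exact ⟨n, hn, wv, hm, (PySem.Chars.startswith_iff _ _).mp hs, (Option.some.injEq _ _).mp hif |>.symm⟩
    · rw [if_neg hs] at hif; exact absurd hif (by simp)
  · rintro ⟨n, hn, wv, hm, hp, rfl⟩
    exact ⟨n, hn, wv, hm, by rw [if_pos ((PySem.Chars.startswith_iff _ _).mpr hp)]⟩

-- the inner filterMap of pvHits at position i is empty iff no word occurs at i
theorem pvInnerNil (s : List Char) (i : Nat) :
    (pvWords.filterMap (fun wv =>
      if PySem.Chars.startswith (s.drop i) wv.1 then some ((i : Int), wv.2) else none)) = [] ↔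
    ∀ wv ∈ pvWords, ¬ wv.1 <+: s.drop i := by
  rw [List.filterMap_eq_nil_iff]
  constructor
  · intro h wv hm hp
    have := h wv hm
    rw [if_pos ((PySem.Chars.startswith_iff _ _).mpr hp)] at this
    simp at this
  · intro h wv hm
    rw [if_neg (fun hs => h wv hm ((PySem.Chars.startswith_iff _ _).mp hs))]

-- membership in the inner filterMap of pvHits
theorem pvInnerMem (s : List Char) (i : Nat) (p : Int × Int)
    (h : p ∈ pvWords.filterMap (fun wv =>
      if PySem.Chars.startswith (s.drop i) wv.1 then some ((i : Int), wv.2) else none)) :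
    ∃ wv ∈ pvWords, wv.1 <+: s.drop i ∧ p = ((i : Int), wv.2) := by
  rcases List.mem_filterMap.mp h with ⟨wv, hm, hif⟩
  by_cases hs : PySem.Chars.startswith (s.drop i) wv.1 = true
  · rw [if_pos hs] at hif
    exact ⟨wv, hm, (PySem.Chars.startswith_iff _ _).mp hs, ((Option.some.injEq _ _).mp hif).symm⟩
  · rw [if_neg hs] at hif; exact absurd hif (by simp)

-- the first hit: an occurrence below which there is none
theorem pvHitsHead (s : List Char) (p : Int × Int) (h : (pvHits s).head? = some p) :
    ∃ (n : Nat) (wv0 : List Char × Int), p = ((n : Int), wv0.2) ∧ n < s.length ∧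
      wv0 ∈ pvWords ∧ wv0.1 <+: s.drop n ∧
      ∀ m < n, ∀ wv ∈ pvWords, ¬ wv.1 <+: s.drop m := by
  obtain ⟨k, hk, hhd, hmin⟩ := pvHeadFlatMap (List.range s.length) _ p h
  rw [List.getElem_range] at hhd
  have hklt : k < s.length := by simpa using hk
  rcases pvInnerMem s k p (List.mem_of_mem_head? hhd) with ⟨wv0, hm0, hp0, hpe⟩
  refine ⟨k, wv0, hpe, hklt, hm0, hp0, ?_⟩
  intro m hm wv hmem hp
  have hmlt : m < (List.range s.length).length := by simp; omega
  have := hmin m hm hmlt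
  rw [List.getElem_range] at this
  exact (pvInnerNil s m).mp this wv hmem hp

-- the last hit: an occurrence above which there is none
theorem pvHitsLast (s : List Char) (p : Int × Int) (h : (pvHits s).getLast? = some p) :
    ∃ (n : Nat) (wv0 : List Char × Int), p = ((n : Int), wv0.2) ∧ n < s.length ∧
      wv0 ∈ pvWords ∧ wv0.1 <+: s.drop n ∧
      ∀ m, n < m → m < s.length → ∀ wv ∈ pvWords, ¬ wv.1 <+: s.drop m := by
  obtain ⟨k, hk, hlast, hmax⟩ := pvLastFlatMap (List.range s.length) _ p h
  rw [List.getElem_range] at hlast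
  have hklt : k < s.length := by simpa using hk
  rcases pvInnerMem s k p (List.mem_of_getLast? hlast) with ⟨wv0, hm0, hp0, hpe⟩
  refine ⟨k, wv0, hpe, hklt, hm0, hp0, ?_⟩
  intro m hm hms wv hmem hp
  have hmlt : m < (List.range s.length).length := by simpa using hms
  have := hmax m hm hmlt
  rw [List.getElem_range] at this
  exact (pvInnerNil s m).mp this wv hmem hp

-- the per-line equivalence
theorem pvLineEq (s : List Char) : pvLineA s = pvFixLine s := by
  cases hh : (pvHits s).head? with
  | none =>
    have hnil : pvHits s = [] := List.head?_eq_none_iff.mp hh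
    have hkeys : (pvPos s).keys = [] := by
      rw [List.eq_nil_iff_forall_not_mem]
      intro k hk
      rcases pvKeyOcc s k hk with ⟨n, _, hn, wv, hm, hp⟩
      have hmem : ((n : Int), wv.2) ∈ pvHits s := (pvHitsMem s _).mpr ⟨n, hn, wv, hm, hp, rfl⟩
      rw [hnil] at hmem
      simp at hmem
    have hitems : (pvPos s).items = [] := by
      have : (pvPos s).items.map Prod.fst = [] := hkeys
      exact List.map_eq_nil_iff.mp this
    have hsize : (pvPos s).size = 0 := by simp [PySem.Dict.size, hitems]
    simp only [pvLineA, pvFixLine]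
    rw [hsize, hh, hnil]
    simp
  | some p =>
    obtain ⟨x1, x2⟩ := p
    have hne : pvHits s ≠ [] := by intro hn; rw [hn] at hh; simp at hh
    obtain ⟨q, hl⟩ : ∃ q, (pvHits s).getLast? = some q := by
      cases hq : (pvHits s).getLast? with
      | none => exact absurd (List.getLast?_eq_none_iff.mp hq) hne
      | some q => exact ⟨q, rfl⟩
    obtain ⟨y1, y2⟩ := q
    rcases pvHitsHead s _ hh with ⟨n0, wv0, hp0, hn0lt, hm0, hocc0, hmin⟩
    rcases pvHitsLast s _ hl with ⟨n1, wv1, hp1, hn1lt, hm1, hocc1, hmax⟩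
    obtain ⟨hx1, hx2⟩ : x1 = (n0 : Int) ∧ x2 = wv0.2 := by
      simpa [Prod.ext_iff] using hp0
    obtain ⟨hy1, hy2⟩ : y1 = (n1 : Int) ∧ y2 = wv1.2 := by
      simpa [Prod.ext_iff] using hp1
    have hK0 := pvOccKeys s n0 wv0 hm0 hocc0
    have hK1 := pvOccKeys s n1 wv1 hm1 hocc1
    have hkeysne : (pvPos s).keys ≠ [] := List.ne_nil_of_mem hK0.1
    have hsize : (pvPos s).size ≠ 0 := by
      intro h0
      have : (pvPos s).items = [] := List.length_eq_zero_iff.mp h0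
      exact hkeysne (by simp [PySem.Dict.keys, this])
    obtain ⟨mn, hmn⟩ : ∃ mn, PySem.List.min? (pvPos s).keys (fun k => k) = some mn := by
      cases hq : PySem.List.min? (pvPos s).keys (fun k => k) with
      | none => exact absurd ((PySem.List.min?_eq_none_iff _ _).mp hq) hkeysne
      | some mn => exact ⟨mn, rfl⟩
    obtain ⟨mx, hmx⟩ : ∃ mx, PySem.List.max? (pvPos s).keys (fun k => k) = some mx := by
      cases hq : PySem.List.max? (pvPos s).keys (fun k => k) with
      | none => exact absurd ((PySem.List.max?_eq_none_iff _ _).mp hq) hkeysne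
      | some mx => exact ⟨mx, rfl⟩
    -- mn = n0
    rcases pvKeyOcc s mn (PySem.List.min?_mem hmn) with ⟨n, hmn_eq, hnlt, wv, hm, hp⟩
    have hn0n : ¬ n < n0 := fun hlt => hmin n hlt wv hm hp
    have hfle : mn ≤ PySem.Chars.find s wv0.1 := PySem.List.min?_isMin hmn _ hK0.1
    have hmneq : mn = (n0 : Int) := by
      have := hK0.2.1
      omega
    -- mx = n1
    rcases pvKeyOcc s mx (PySem.List.max?_mem hmx) with ⟨n', hmx_eq, hn'lt, wv', hm', hp'⟩
    have hn1n : ¬ n1 < n' := fun hlt => hmax n' hlt hn'lt wv' hm' hp'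
    have hrge : PySem.Chars.rfind s wv1.1 ≤ mx := PySem.List.max?_isMax hmx _ hK1.2.2.1
    have hmxeq : mx = (n1 : Int) := by
      have := hK1.2.2.2
      omega
    have hv0 : (pvPos s).getD mn 0 = wv0.2 := by
      rw [hmneq]
      exact pvValue s n0 wv0 hm0 hocc0 (hmneq ▸ PySem.List.min?_mem hmn)
    have hv1 : (pvPos s).getD mx 0 = wv1.2 := by
      rw [hmxeq]
      exact pvValue s n1 wv1 hm1 hocc1 (hmxeq ▸ PySem.List.max?_mem hmx)
    simp only [pvLineA, pvFixLine]
    rw [hh, hl, if_pos hsize, hmn, hmx]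
    simp only [hmneq, hmxeq, hx1, hx2, hy1, hy2]
    rw [hmneq] at hv0
    rw [hmxeq] at hv1
    rw [hv0, hv1]

theorem transform_data_spec : Claim_equal_transform_data := by
  intro data _
  unfold Spec_transform_data transform_data transform_data_alt
  rw [PySem.List.foldl_append_singleton_eq_map]
  simp [pvLineEq]
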